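-- pv_equiv track=rewrite | github.com/MrWh1teF0x/python_mipt_dafe | hello.py | check_comand
-- ===== SOURCE A (Python) =====
-- def check_comand(user_comand: str, comands: list[str]) -> bool:
--     flag = 0
--     for comand in comands:
--         f = False
--         for a in comand:
--             for i in range(len(user_comand)):
--                 uc = list(user_comand)
--                 uc[i] = a
--                 if ''.join(uc) == comand:
--                     f = True
--                     break
--             for i in range(len(user_comand)+1):
--                 uc = list(user_comand)
--                 uc.insert(i, a)
--                 if ''.join(uc) == comand:
--                     f = True
--                     break
--             for i in range(len(user_comand)):
--                 uc = list(user_comand)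
--                 del uc[i]
--                 if ''.join(uc) == comand:
--                     f = True
--                     break
--         flag += f
--     if flag == 1:
--         return True
--     return False
-- ===== SOURCE B (Python) =====
-- def check_comand(user_comand: str, comands: list[str]) -> bool:
--     def near(u: str, c: str) -> bool:
--         # c matches iff c is nonempty and is u, or u with one char replaced,
--         # one char inserted, or one char deleted (single linear scan).
--         if not c:
--             return False
--         if len(u) == len(c):
--             return sum(x != y for x, y in zip(u, c)) <= 1
--         if abs(len(u) - len(c)) != 1:
--             return False
--         s, l = (u, c) if len(u) < len(c) else (c, u)
--         i = 0
--         while i < len(s) and s[i] == l[i]: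
--             i += 1
--         return s[i:] == l[i + 1:]
--     return sum(near(user_comand, c) for c in comands) == 1
-- ===== Notes on version B (the rewrite author's own statement) =====
-- stated objective: faster
-- what changed: Replaces A's generate-and-compare search (for every command, every character of it tried at every substitution/insertion/deletion position, each candidate string rebuilt and compared) by a single linear one-edit-distance scan per command (Hamming count for equal lengths, one common-prefix skip for length difference 1), then counts matching commands.
import Mathlib
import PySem

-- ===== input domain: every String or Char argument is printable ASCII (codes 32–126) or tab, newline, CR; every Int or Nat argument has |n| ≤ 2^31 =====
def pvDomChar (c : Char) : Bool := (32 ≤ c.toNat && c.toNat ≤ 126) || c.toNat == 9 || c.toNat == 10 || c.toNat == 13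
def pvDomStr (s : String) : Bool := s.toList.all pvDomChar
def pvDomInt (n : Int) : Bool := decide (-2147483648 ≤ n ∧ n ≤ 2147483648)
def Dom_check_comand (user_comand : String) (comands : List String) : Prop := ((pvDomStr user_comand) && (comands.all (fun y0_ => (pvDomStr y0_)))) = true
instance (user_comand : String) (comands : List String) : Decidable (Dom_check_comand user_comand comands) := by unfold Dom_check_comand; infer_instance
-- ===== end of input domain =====

-- B replaces A's cubic generate-and-compare search (every char of each command tried at
-- every substitution/insertion/deletion position) by one linear ≤1-edit scan per command:
-- same return value, asymptotically faster.

-- ===== PORT A =====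
-- A-side helper: the body of `for a in comand`. Each Python `for i in range(n): … if …: f=True; break`
-- (indices always in range, so uc[i]=a / insert / del are total here) is `(List.range n).any`.
def pvStepA (u c : List Char) (f : Bool) (a : Char) : Bool :=
  let f := if (List.range u.length).any (fun i => decide (u.set i a = c)) then true else f
  let f := if (List.range (u.length + 1)).any (fun i => decide (u.insertIdx i a = c)) then true else f
  let f := if (List.range u.length).any (fun i => decide (u.eraseIdx i = c)) then true else f
  f

def check_comand (user_comand : String) (comands : List String) : Bool :=
  let u := user_comand.toList
  let flag : Int := comands.foldl (fun flag comand =>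
    let c := comand.toList
    let f : Bool := c.foldl (pvStepA u c) false
    flag + (if f then 1 else 0)) 0
  decide (flag = 1)

-- ===== PORT B =====
-- B-side helper: Source B's `while i < len(s) and s[i] == l[i]: i += 1; return s[i:] == l[i+1:]`
-- (the while loop as structural recursion; only ever called with l one longer than s).
def pvOneIns : List Char → List Char → Bool
  | [], l => decide (([] : List Char) = l.drop 1)
  | _ :: _, [] => false
  | x :: s, y :: l => if x = y then pvOneIns s l else decide (x :: s = l)

-- B-side helper: Source B's `near`.
def pvNear (u c : List Char) : Bool :=
  if c = [] then false
  else if u.length = c.length then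
    decide ((u.zip c).countP (fun p => decide (p.1 ≠ p.2)) ≤ 1)
  else if u.length + 1 = c.length then pvOneIns u c
  else if c.length + 1 = u.length then pvOneIns c u
  else false

def check_comand_alt (user_comand : String) (comands : List String) : Bool :=
  decide (comands.countP (fun c => pvNear user_comand.toList c.toList) = 1)

-- ===== PRECONDITION & SPEC =====
def Spec_check_comand (user_comand : String) (comands : List String) (out : Bool) : Prop := out = check_comand_alt user_comand comands
instance (user_comand : String) (comands : List String) (out : Bool) : Decidable (Spec_check_comand user_comand comands out) := by unfold Spec_check_comand; infer_instance

-- ===== CLAIM (what is proved, stated in full; the proofs are below) =====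
def Claim_equal_check_comand : Prop := ∀ (user_comand : String) (comands : List String), Dom_check_comand user_comand comands → Spec_check_comand user_comand comands (check_comand user_comand comands)

-- ===== LEMMAS AND PROOFS =====

-- the per-character disjunction A's three inner loops compute
def pvG (u c : List Char) (a : Char) : Bool :=
  (List.range u.length).any (fun i => decide (u.set i a = c))
  || (List.range (u.length + 1)).any (fun i => decide (u.insertIdx i a = c))
  || (List.range u.length).any (fun i => decide (u.eraseIdx i = c))

theorem pvStepA_eq (u c : List Char) (f : Bool) (a : Char) :
    pvStepA u c f a = (pvG u c a || f) := by
  simp only [pvStepA, pvG, Bool.if_true_left]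
  cases (List.range u.length).any (fun i => decide (u.set i a = c)) <;>
    cases (List.range (u.length + 1)).any (fun i => decide (u.insertIdx i a = c)) <;>
      cases (List.range u.length).any (fun i => decide (u.eraseIdx i = c)) <;>
        cases f <;> rfl

theorem pvLoop_eq_any (u c : List Char) : ∀ (l : List Char) (b : Bool),
    l.foldl (pvStepA u c) b = (b || l.any (pvG u c))
  | [], b => by simp
  | x :: l, b => by
    simp only [List.foldl_cons, List.any_cons, pvStepA_eq, pvLoop_eq_any u c l]
    cases b <;> cases pvG u c x <;> simp

def pvHam (u c : List Char) : Nat := (u.zip c).countP (fun p => decide (p.1 ≠ p.2))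

theorem pvHam_cons_eq (x : Char) (u c : List Char) :
    pvHam (x :: u) (x :: c) = pvHam u c := by
  unfold pvHam
  rw [List.zip_cons_cons, List.countP_cons]
  simp

theorem pvHam_cons_ne (x y : Char) (u c : List Char) (h : x ≠ y) :
    pvHam (x :: u) (y :: c) = pvHam u c + 1 := by
  unfold pvHam
  rw [List.zip_cons_cons, List.countP_cons]
  simp [h]

theorem pvHam_self : ∀ u : List Char, pvHam u u = 0
  | [] => rfl
  | x :: u => by rw [pvHam_cons_eq, pvHam_self u]

theorem pvHam_eq_zero : ∀ (u c : List Char), u.length = c.length → (pvHam u c = 0 ↔ u = c)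
  | [], [], _ => by simp [pvHam]
  | [], _ :: _, h => by simp at h
  | _ :: _, [], h => by simp at h
  | x :: u, y :: c, h => by
    simp only [List.length_cons, Nat.add_right_cancel_iff] at h
    by_cases hxy : x = y
    · subst hxy
      rw [pvHam_cons_eq]
      simp [pvHam_eq_zero u c h]
    · rw [pvHam_cons_ne x y u c hxy]
      simp [hxy]

theorem pvMem_set_self : ∀ (l : List Char) (i : Nat) (a : Char), i < l.length → a ∈ l.set i a
  | x :: l, 0, a, _ => by simp
  | x :: l, i + 1, a, h => by
    simp only [List.set_cons_succ, List.mem_cons]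
    exact Or.inr (pvMem_set_self l i a (by simpa using h))

theorem pvOneIns_cons_self : ∀ (s : List Char) (a : Char), pvOneIns s (a :: s) = true
  | [], _ => by simp [pvOneIns]
  | z :: s, a => by
    simp only [pvOneIns]
    by_cases h : z = a
    · rw [if_pos h]; exact pvOneIns_cons_self s z
    · rw [if_neg h]; simp

-- A's substitution loop hits iff lengths are equal, u nonempty, and Hamming distance ≤ 1.
theorem pvSub_iff : ∀ (u c : List Char),
    (∃ a ∈ c, ∃ i, i < u.length ∧ u.set i a = c) ↔
      (u ≠ [] ∧ u.length = c.length ∧ pvHam u c ≤ 1)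
  | [], c => by simp
  | x :: u, [] => by
    constructor
    · rintro ⟨a, ha, _⟩; simp at ha
    · rintro ⟨_, h, _⟩; simp at h
  | x :: u, y :: c => by
    have key : (∃ a ∈ y :: c, ∃ i, i < (x :: u).length ∧ (x :: u).set i a = y :: c) ↔
        (u = c ∨ (x = y ∧ ∃ a ∈ c, ∃ i, i < u.length ∧ u.set i a = c)) := by
      constructor
      · rintro ⟨a, ha, i, hi, hset⟩
        cases i with
        | zero =>
          simp only [List.set_cons_zero, List.cons.injEq] at hset
          exact Or.inl hset.2
        | succ j =>
          simp only [List.set_cons_succ, List.cons.injEq] at hset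
          simp only [List.length_cons] at hi
          have hj : j < u.length := by omega
          have hmem : a ∈ c := hset.2 ▸ pvMem_set_self u j a hj
          exact Or.inr ⟨hset.1, a, hmem, j, hj, hset.2⟩
      · rintro (h | ⟨hxy, a, ha, j, hj, hset⟩)
        · exact ⟨y, List.mem_cons_self, 0, by simp, by simp [h]⟩
        · exact ⟨a, List.mem_cons_of_mem _ ha, j + 1, by simp [Nat.succ_lt_succ hj],
            by simp [hxy, hset]⟩
    rw [key]
    by_cases hxy : x = y
    · subst hxy
      rw [pvSub_iff u c, pvHam_cons_eq]
      constructor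
      · rintro (h | ⟨_, _, hlen, hh⟩)
        · subst h
          exact ⟨by simp, by simp, by simp [pvHam_self]⟩
        · exact ⟨by simp, by simp [hlen], hh⟩
      · rintro ⟨_, hlen, hh⟩
        have hlen' : u.length = c.length := by simpa using hlen
        rcases eq_or_ne u [] with hu | hu
        · subst hu
          have : c = [] := List.length_eq_zero_iff.1 hlen'.symm
          exact Or.inl (by simp [this])
        · exact Or.inr ⟨rfl, hu, hlen', hh⟩
    · rw [pvHam_cons_ne x y u c hxy]
      constructor
      · rintro (h | ⟨h, _⟩)
        · subst h
          refine ⟨by simp, by simp, ?_⟩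
          rw [pvHam_self]
        · exact absurd h hxy
      · rintro ⟨_, hlen, hh⟩
        have hlen' : u.length = c.length := by simpa using hlen
        have h0 : pvHam u c = 0 := by omega
        exact Or.inl ((pvHam_eq_zero u c hlen').1 h0)

-- A's insertion loop hits iff c is u with exactly one char inserted (B's linear scan).
theorem pvIns_iff : ∀ (u c : List Char),
    (∃ a ∈ c, ∃ i, i < u.length + 1 ∧ u.insertIdx i a = c) ↔
      (u.length + 1 = c.length ∧ pvOneIns u c = true)
  | u, [] => by
    constructor
    · rintro ⟨a, ha, _⟩; simp at ha
    · rintro ⟨h, _⟩; simp at h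
  | [], y :: c => by
    constructor
    · rintro ⟨a, ha, i, hi, hins⟩
      have hi0 : i = 0 := by simp at hi; omega
      subst hi0
      simp only [List.insertIdx_zero] at hins
      have hc : c = [] := by simpa using congrArg List.tail hins
      subst hc
      exact ⟨by simp, by simp [pvOneIns]⟩
    · rintro ⟨hlen, _⟩
      have hc : c = [] := by
        have : c.length = 0 := by simpa using hlen.symm
        exact List.length_eq_zero_iff.1 this
      subst hc
      exact ⟨y, by simp, 0, by omega, by simp⟩
  | x :: u, y :: c => by
    have key : (∃ a ∈ y :: c, ∃ i, i < (x :: u).length + 1 ∧ (x :: u).insertIdx i a = y :: c) ↔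
        (c = x :: u ∨ (x = y ∧ ∃ a ∈ c, ∃ i, i < u.length + 1 ∧ u.insertIdx i a = c)) := by
      constructor
      · rintro ⟨a, ha, i, hi, hins⟩
        cases i with
        | zero =>
          simp only [List.insertIdx_zero, List.cons.injEq] at hins
          exact Or.inl hins.2.symm
        | succ j =>
          simp only [List.insertIdx_succ_cons, List.cons.injEq] at hins
          simp only [List.length_cons] at hi
          have hj : j < u.length + 1 := by omega
          have hmem : a ∈ c := by
            have : a ∈ u.insertIdx j a := (List.mem_insertIdx (by omega)).2 (Or.inl rfl)
            rwa [hins.2] at this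
          exact Or.inr ⟨hins.1, a, hmem, j, hj, hins.2⟩
      · rintro (h | ⟨hxy, a, ha, j, hj, hins⟩)
        · exact ⟨y, List.mem_cons_self, 0, by omega, by simp [h]⟩
        · exact ⟨a, List.mem_cons_of_mem _ ha, j + 1, by simpa using Nat.succ_lt_succ hj,
            by simp [List.insertIdx_succ_cons, hxy, hins]⟩
    rw [key]
    by_cases hxy : x = y
    · subst hxy
      rw [pvIns_iff u c]
      constructor
      · rintro (h | ⟨_, hlen, hins⟩)
        · subst h
          exact ⟨by simp, pvOneIns_cons_self (x :: u) x⟩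
        · exact ⟨by simpa using hlen, by simp [pvOneIns, hins]⟩
      · rintro ⟨hlen, hins⟩
        simp only [pvOneIns] at hins
        exact Or.inr ⟨rfl, by simpa using hlen, hins⟩
    · constructor
      · rintro (h | ⟨h, _⟩)
        · subst h
          exact ⟨by simp, by simp [pvOneIns, hxy]⟩
        · exact absurd h hxy
      · rintro ⟨hlen, hins⟩
        simp only [pvOneIns, if_neg hxy, decide_eq_true_eq] at hins
        exact Or.inl hins.symm

-- A's deletion loop hits iff c is u with exactly one char deleted.
theorem pvDel_iff : ∀ (u c : List Char),
    (∃ i, i < u.length ∧ u.eraseIdx i = c) ↔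
      (c.length + 1 = u.length ∧ pvOneIns c u = true)
  | [], c => by
    constructor
    · rintro ⟨i, hi, _⟩; simp at hi
    · rintro ⟨h, _⟩; simp at h
  | x :: u, [] => by
    constructor
    · rintro ⟨i, hi, herase⟩
      cases i with
      | zero =>
        simp only [List.eraseIdx_cons_zero] at herase
        subst herase
        exact ⟨by simp, by simp [pvOneIns]⟩
      | succ j => simp [List.eraseIdx_cons_succ] at herase
    · rintro ⟨hlen, _⟩
      have hu : u = [] := by
        have : u.length = 0 := by simpa using hlen.symm
        exact List.length_eq_zero_iff.1 this
      subst hu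
      exact ⟨0, by simp, by simp⟩
  | x :: u, y :: c => by
    have key : (∃ i, i < (x :: u).length ∧ (x :: u).eraseIdx i = y :: c) ↔
        (u = y :: c ∨ (x = y ∧ ∃ i, i < u.length ∧ u.eraseIdx i = c)) := by
      constructor
      · rintro ⟨i, hi, herase⟩
        cases i with
        | zero =>
          simp only [List.eraseIdx_cons_zero] at herase
          exact Or.inl herase
        | succ j =>
          simp only [List.eraseIdx_cons_succ, List.cons.injEq] at herase
          simp only [List.length_cons] at hi
          exact Or.inr ⟨herase.1, j, by omega, herase.2⟩
      · rintro (h | ⟨hxy, j, hj, herase⟩)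
        · exact ⟨0, by simp, by simp [h]⟩
        · exact ⟨j + 1, by simpa using Nat.succ_lt_succ hj, by simp [hxy, herase]⟩
    rw [key]
    by_cases hxy : x = y
    · subst hxy
      rw [pvDel_iff u c]
      constructor
      · rintro (h | ⟨_, hlen, hins⟩)
        · subst h
          exact ⟨by simp, pvOneIns_cons_self (x :: c) x⟩
        · exact ⟨by simpa using hlen, by simp [pvOneIns, hins]⟩
      · rintro ⟨hlen, hins⟩
        simp only [pvOneIns] at hins
        exact Or.inr ⟨rfl, by simpa using hlen, hins⟩
    · constructor
      · rintro (h | ⟨h, _⟩)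
        · subst h
          refine ⟨by simp, ?_⟩
          simp only [pvOneIns]
          rw [if_neg (fun h => hxy h.symm)]
          simp
        · exact absurd h hxy
      · rintro ⟨hlen, hins⟩
        simp only [pvOneIns] at hins
        rw [if_neg (fun h => hxy h.symm)] at hins
        simp only [decide_eq_true_eq] at hins
        exact Or.inl hins.symm

-- per-command equality: A's inner triple loop equals B's `near`
theorem pvInner_eq_near (u c : List Char) : c.any (pvG u c) = pvNear u c := by
  rw [Bool.eq_iff_iff]
  have hany : c.any (pvG u c) = true ↔
      ((∃ a ∈ c, ∃ i, i < u.length ∧ u.set i a = c) ∨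
       (∃ a ∈ c, ∃ i, i < u.length + 1 ∧ u.insertIdx i a = c) ∨
       (c ≠ [] ∧ ∃ i, i < u.length ∧ u.eraseIdx i = c)) := by
    simp only [List.any_eq_true, pvG, Bool.or_eq_true, List.mem_range, decide_eq_true_eq]
    constructor
    · rintro ⟨a, ha, (⟨i, hi, h⟩ | ⟨i, hi, h⟩) | ⟨i, hi, h⟩⟩
      · exact Or.inl ⟨a, ha, i, hi, h⟩
      · exact Or.inr (Or.inl ⟨a, ha, i, hi, h⟩)
      · exact Or.inr (Or.inr ⟨List.ne_nil_of_mem ha, i, hi, h⟩)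
    · rintro (⟨a, ha, i, hi, h⟩ | ⟨a, ha, i, hi, h⟩ | ⟨hc, i, hi, h⟩)
      · exact ⟨a, ha, Or.inl (Or.inl ⟨i, hi, h⟩)⟩
      · exact ⟨a, ha, Or.inl (Or.inr ⟨i, hi, h⟩)⟩
      · obtain ⟨a, ha⟩ := List.exists_mem_of_ne_nil c hc
        exact ⟨a, ha, Or.inr ⟨i, hi, h⟩⟩
  rw [hany, pvSub_iff, pvIns_iff, pvDel_iff]
  unfold pvNear
  split_ifs with h0 h1 h2 h3
  · subst h0
    simp
    exact fun h1 h2 => absurd h2 h1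
  · constructor
    · rintro (⟨_, _, hh⟩ | ⟨hlen, _⟩ | ⟨_, hlen, _⟩) <;>
        first
        | (simp only [decide_eq_true_eq]; exact hh)
        | omega
    · intro hh
      simp only [decide_eq_true_eq] at hh
      have hu : u ≠ [] := by
        intro h; subst h
        have : c = [] := List.length_eq_zero_iff.1 (by simpa using h1.symm)
        exact h0 this
      exact Or.inl ⟨hu, h1, hh⟩
  · constructor
    · rintro (⟨_, hlen, _⟩ | ⟨_, hh⟩ | ⟨_, hlen, _⟩) <;> first | exact hh | omega
    · intro hh; exact Or.inr (Or.inl ⟨h2, hh⟩)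
  · constructor
    · rintro (⟨_, hlen, _⟩ | ⟨hlen, _⟩ | ⟨_, _, hh⟩) <;> first | exact hh | omega
    · intro hh; exact Or.inr (Or.inr ⟨h0, h3, hh⟩)
  · constructor
    · rintro (⟨_, hlen, _⟩ | ⟨hlen, _⟩ | ⟨_, hlen, _⟩) <;> omega
    · intro hh; simp at hh

theorem pvFold_count (u : List Char) : ∀ (cs : List String) (acc : Int),
    cs.foldl (fun flag comand =>
      flag + (if comand.toList.foldl (pvStepA u comand.toList) false then 1 else 0)) acc
      = acc + (cs.countP (fun c => pvNear u c.toList) : Nat)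
  | [], acc => by simp
  | s :: cs, acc => by
    simp only [List.foldl_cons, List.countP_cons, pvFold_count u cs,
      pvLoop_eq_any u s.toList s.toList, Bool.false_or, pvInner_eq_near u s.toList]
    cases pvNear u s.toList <;> (simp; try ring)

-- ===== VERDICT (by name: the statement is the Claim_ definition above) =====
theorem check_comand_spec : Claim_equal_check_comand := by
  intro user_comand comands _
  unfold Spec_check_comand check_comand check_comand_alt
  dsimp only
  rw [pvFold_count user_comand.toList comands 0]
  simp only [Int.zero_add, decide_eq_decide]
  omega
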